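-- pv_equiv track=rewrite | github.com/buddejul/topics_sim | src/estimation.py | ampl_code_rhs_constraint
-- ===== SOURCE A (Python) =====
-- def ampl_code_rhs_constraint(identif):
--     """
--     Generate AMPL code for the probem in the RHS of the constraint in estimation
--     see MST equation (27) and following discussion.
--
--     For this we only need the dataframes
--
--     Note the target is in absolute value; to code this we are using tricks from
--     from the following sources (adding additional slack variables).
--
--     See the first answer in:
--     https://math.stackexchange.com/questions/432003/converting-absolute-value-program-into-linear-program
--
--     Also see here:
--     https://groups.google.com/g/ampl/c/FKqSLiPyHP0
--
--     And here (most helpful for understanding the "trick"):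
--     https://lpsolve.sourceforge.net/5.1/absolute.htm
--
--
--     Approach: The objective in the case of S identified estimands is given by
--         min abs(sum([x * g_1]) - b_1) + abs(sum([x * g_2]) - b_2) + ... + abs(sum([x * g_S]) - b_S)
--
--     The tricky bit is the absolute value. Rewrite the objective as follows:
--         min abs(X_1) + abs(X_2) + ... + abs(X_S)
--
--     Now we add S variables called X_s' and for each variable two constraints:
--         min X_1' + X_2' + ... + X_S'
--         s.t.
--         X_s' >= X_s
--         X_s' >= -X_s
--
--         for all s = 1, ..., S
--
--     Note X' >= 0 else the constraints cannot be satisfied.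
--
--     Now we can think about three cases:
--         - X_s>0: Then -X_s<0 hence constraint two holds (X's are non-negative).
--             Further, X_s <= X_s' only constraints X_s' to be at least as large as
--             X_s. However, the objective minimizes over X_s', so X_s' = X.
--         - X_s<0: Then constraint is automatically satisfied. Constraint two implies
--             that X_s' must be as large as -X_s>0, but the objective minimizes over X_s',
--             hence X_s' = -X_s.
--         - X_s=0: The constraints are always satisfied and the minimal X_s' is 0.
--     Hence, X_s' = abs(X_s).
--
--     Now plug in the original definition of X_s to get the desired program.
--     Note we essentially moved all the "real" variables to the constraints!
--
--     Args:
--         identif (list): list of identified estimands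
--
--     Returns:
--         ampl_code (str): AMPL code for problem in the RHS of the constraint
--     """
--
--     # Generate AMPL code for the identified set
--     # Define sets
--     ampl_code = "reset;\n"
--     ampl_code += "set THETA;\n"
--     for i in range(len(identif)):
--         ampl_code += "set IDENTIF_" + str(i) + ";\n"
--
--     # Define parameters
--     for i in range(len(identif)):
--         ampl_code += "param gamma_ident_" + str(i) + " {THETA};\n"
--         ampl_code += "param val_identif_" + str(i) + " {IDENTIF_" + str(i) + "};\n"
--
--     # Choice variable (note this is equivalent to Y in [0,1] constraint, see MST 2018 Appendix)
--     ampl_code += "var Theta_val {j in THETA} >= 0, <= 1;\n"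
--
--     # Add a "dummy" variable for each identified estimand (trick to get abs value)
--     for i in range(len(identif)):
--         ampl_code += "var X_" + str(i) + " >= 0;\n"
--
--     # Objective function
--     ampl_code += "minimize beta: "
--     for i in range(len(identif)):
--         ampl_code += "X_" + str(i)
--         if i < len(identif) - 1:
--             ampl_code += " + "
--
--     ampl_code += ";\n"
--
--     # Constraints to get absolute value into objective function
--     for i in range(len(identif)):
--         # Foreach identified estimand:
--             # The LHS computes: - estimated estimand + implied estimand by minimizer (or "-" that for the second one)
--             # The RHS is the slack variable X_i
--
--         ampl_code += "subject to abs_1_" + str(i) + " {i in IDENTIF_" + str(i) + "}:\n"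
--         ampl_code += "(-val_identif_" + str(i) + "[i] + sum {j in THETA} gamma_ident_" + str(i) + "[j] * Theta_val[j]) <= X_" + str(i) + ";\n"
--
--         ampl_code += "subject to abs_2_" + str(i) + " {i in IDENTIF_" + str(i) + "}:\n"
--         ampl_code += "-(-val_identif_" + str(i) + "[i] + sum {j in THETA} gamma_ident_" + str(i) + "[j] * Theta_val[j]) <= X_" + str(i) + ";\n"
--
--     return ampl_code
-- ===== SOURCE B (Python) =====
-- def ampl_code_rhs_constraint(identif):
--     """Single pass building the five sections as lists, assembled once with join."""
--     sets, params, dummies, obj, cons = [], [], [], [], []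
--     for i in range(len(identif)):
--         sets.append(f"set IDENTIF_{i};\n")
--         params.append(f"param gamma_ident_{i} {{THETA}};\nparam val_identif_{i} {{IDENTIF_{i}}};\n")
--         dummies.append(f"var X_{i} >= 0;\n")
--         obj.append(f"X_{i}")
--         cons.append(
--             f"subject to abs_1_{i} {{i in IDENTIF_{i}}}:\n"
--             f"(-val_identif_{i}[i] + sum {{j in THETA}} gamma_ident_{i}[j] * Theta_val[j]) <= X_{i};\n"
--             f"subject to abs_2_{i} {{i in IDENTIF_{i}}}:\n"
--             f"-(-val_identif_{i}[i] + sum {{j in THETA}} gamma_ident_{i}[j] * Theta_val[j]) <= X_{i};\n"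
--         )
--     return ("reset;\nset THETA;\n" + "".join(sets) + "".join(params)
--             + "var Theta_val {j in THETA} >= 0, <= 1;\n" + "".join(dummies)
--             + "minimize beta: " + " + ".join(obj) + ";\n" + "".join(cons))
-- ===== Notes on version B (the rewrite author's own statement) =====
-- stated objective: idiomatic
-- what changed: A's five separate string-+= scans (one per section, with a conditional trailing ' + ' in the objective loop) are replaced by a single pass that collects the five sections as lists, assembled once with ''.join and ' + '.join.
import Mathlib
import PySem

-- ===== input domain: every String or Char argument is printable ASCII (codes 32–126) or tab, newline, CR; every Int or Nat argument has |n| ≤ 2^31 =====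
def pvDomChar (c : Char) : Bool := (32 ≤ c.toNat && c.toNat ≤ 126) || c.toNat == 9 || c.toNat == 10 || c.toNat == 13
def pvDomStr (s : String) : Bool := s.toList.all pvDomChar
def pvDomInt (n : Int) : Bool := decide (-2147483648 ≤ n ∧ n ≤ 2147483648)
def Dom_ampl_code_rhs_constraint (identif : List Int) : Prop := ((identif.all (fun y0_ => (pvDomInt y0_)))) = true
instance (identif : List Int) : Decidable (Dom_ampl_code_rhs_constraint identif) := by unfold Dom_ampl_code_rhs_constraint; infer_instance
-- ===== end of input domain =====

-- B replaces A's repeated string-accumulating scans by one pass building the five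
-- sections as lists that are assembled once with join (objective: idiomatic).

-- ===== PORT A =====
-- Literal transliteration of A: sequential += loops over range(len(identif)).
-- `for i in range(len(identif))` is a fold over List.range identif.length (i : Nat, always ≥ 0);
-- `i < len(identif) - 1` is written i + 1 < n, equal over the integers.
def ampl_code_rhs_constraint (identif : List Int) : String :=
  let n := identif.length
  let c1 := "reset;\n" ++ "set THETA;\n"
  let c2 := (List.range n).foldl (fun (s : String) (i : Nat) =>
      s ++ "set IDENTIF_" ++ PySem.Int.toStr i ++ ";\n") c1
  let c3 := (List.range n).foldl (fun (s : String) (i : Nat) =>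
      s ++ "param gamma_ident_" ++ PySem.Int.toStr i ++ " {THETA};\n"
        ++ "param val_identif_" ++ PySem.Int.toStr i ++ " {IDENTIF_" ++ PySem.Int.toStr i ++ "};\n") c2
  let c4 := c3 ++ "var Theta_val {j in THETA} >= 0, <= 1;\n"
  let c5 := (List.range n).foldl (fun (s : String) (i : Nat) =>
      s ++ "var X_" ++ PySem.Int.toStr i ++ " >= 0;\n") c4
  let c6 := c5 ++ "minimize beta: "
  let c7 := (List.range n).foldl (fun (s : String) (i : Nat) =>
      if i + 1 < n then s ++ "X_" ++ PySem.Int.toStr i ++ " + "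
      else s ++ "X_" ++ PySem.Int.toStr i) c6
  let c8 := c7 ++ ";\n"
  let c9 := (List.range n).foldl (fun (s : String) (i : Nat) =>
      s ++ "subject to abs_1_" ++ PySem.Int.toStr i ++ " {i in IDENTIF_" ++ PySem.Int.toStr i ++ "}:\n"
        ++ "(-val_identif_" ++ PySem.Int.toStr i ++ "[i] + sum {j in THETA} gamma_ident_" ++ PySem.Int.toStr i ++ "[j] * Theta_val[j]) <= X_" ++ PySem.Int.toStr i ++ ";\n"
        ++ "subject to abs_2_" ++ PySem.Int.toStr i ++ " {i in IDENTIF_" ++ PySem.Int.toStr i ++ "}:\n"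
        ++ "-(-val_identif_" ++ PySem.Int.toStr i ++ "[i] + sum {j in THETA} gamma_ident_" ++ PySem.Int.toStr i ++ "[j] * Theta_val[j]) <= X_" ++ PySem.Int.toStr i ++ ";\n") c8
  c9

-- ===== PORT B =====
-- B's per-index section strings (the f-strings of Source B).
def pvSetDecl (i : Nat) : String :=
  "set IDENTIF_" ++ PySem.Int.toStr i ++ ";\n"
def pvParamDecl (i : Nat) : String :=
  "param gamma_ident_" ++ PySem.Int.toStr i ++ " {THETA};\nparam val_identif_" ++ PySem.Int.toStr i ++ " {IDENTIF_" ++ PySem.Int.toStr i ++ "};\n"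
def pvDummyDecl (i : Nat) : String :=
  "var X_" ++ PySem.Int.toStr i ++ " >= 0;\n"
def pvObjTerm (i : Nat) : String :=
  "X_" ++ PySem.Int.toStr i
def pvConstraintPair (i : Nat) : String :=
  "subject to abs_1_" ++ PySem.Int.toStr i ++ " {i in IDENTIF_" ++ PySem.Int.toStr i ++ "}:\n"
    ++ "(-val_identif_" ++ PySem.Int.toStr i ++ "[i] + sum {j in THETA} gamma_ident_" ++ PySem.Int.toStr i ++ "[j] * Theta_val[j]) <= X_" ++ PySem.Int.toStr i ++ ";\n"
    ++ "subject to abs_2_" ++ PySem.Int.toStr i ++ " {i in IDENTIF_" ++ PySem.Int.toStr i ++ "}:\n"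
    ++ "-(-val_identif_" ++ PySem.Int.toStr i ++ "[i] + sum {j in THETA} gamma_ident_" ++ PySem.Int.toStr i ++ "[j] * Theta_val[j]) <= X_" ++ PySem.Int.toStr i ++ ";\n"

-- One pass appending to five lists, then a single join-based assembly.
def ampl_code_rhs_constraint_alt (identif : List Int) : String :=
  let acc := (List.range identif.length).foldl
    (fun (acc : List String × List String × List String × List String × List String) i =>
      (acc.1 ++ [pvSetDecl i], acc.2.1 ++ [pvParamDecl i], acc.2.2.1 ++ [pvDummyDecl i],
       acc.2.2.2.1 ++ [pvObjTerm i], acc.2.2.2.2 ++ [pvConstraintPair i]))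
    ([], [], [], [], [])
  "reset;\nset THETA;\n" ++ PySem.Str.join "" acc.1 ++ PySem.Str.join "" acc.2.1 ++
    "var Theta_val {j in THETA} >= 0, <= 1;\n" ++ PySem.Str.join "" acc.2.2.1 ++
    "minimize beta: " ++ PySem.Str.join " + " acc.2.2.2.1 ++ ";\n" ++ PySem.Str.join "" acc.2.2.2.2

-- ===== PRECONDITION & SPEC =====
def Spec_ampl_code_rhs_constraint (identif : List Int) (out : String) : Prop := out = ampl_code_rhs_constraint_alt identif
instance (identif : List Int) (out : String) : Decidable (Spec_ampl_code_rhs_constraint identif out) := by unfold Spec_ampl_code_rhs_constraint; infer_instance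

-- ===== CLAIM (what is proved, stated in full; the proofs are below) =====
def Claim_equal_ampl_code_rhs_constraint : Prop := ∀ (identif : List Int), Dom_ampl_code_rhs_constraint identif → Spec_ampl_code_rhs_constraint identif (ampl_code_rhs_constraint identif)

-- ===== LEMMAS AND PROOFS =====

-- Chars.join with empty separator is concatenation, head by head.
theorem pv_join_nil_cons (a : List Char) (rest : List (List Char)) :
    PySem.Chars.join [] (a :: rest) = a ++ PySem.Chars.join [] rest := by
  cases rest with
  | nil => simp [PySem.Chars.join_singleton, PySem.Chars.join_nil]
  | cons b t => simp [PySem.Chars.join_cons_cons]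

theorem pv_join_cons_of_ne_nil (sep a : List Char) {l : List (List Char)} (h : l ≠ []) :
    PySem.Chars.join sep (a :: l) = a ++ sep ++ PySem.Chars.join sep l := by
  obtain ⟨b, t, rfl⟩ := List.exists_cons_of_ne_nil h
  exact PySem.Chars.join_cons_cons sep a b t

theorem pv_join_append_singleton (xs : List (List Char)) (y : List Char) :
    PySem.Chars.join [] (xs ++ [y]) = PySem.Chars.join [] xs ++ y := by
  induction xs with
  | nil => simp [PySem.Chars.join_singleton, PySem.Chars.join_nil]
  | cons a l ih => rw [List.cons_append, pv_join_nil_cons, pv_join_nil_cons, ih,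
      List.append_assoc]

-- A string-accumulating fold is the initial value followed by the joined pieces.
theorem pv_foldl_append_toList (g : Nat → String) :
    ∀ (l : List Nat) (init : String),
      (l.foldl (fun s i => s ++ g i) init).toList
        = init.toList ++ PySem.Chars.join [] (l.map (fun i => (g i).toList)) := by
  intro l
  induction l with
  | nil => intro init; simp [PySem.Chars.join_nil]
  | cons a t ih =>
      intro init
      simp only [List.foldl_cons, List.map_cons, pv_join_nil_cons, ih,
        String.toList_append, List.append_assoc]

-- The single pass over the five accumulator lists appends one mapped element per list.
theorem pv_build5 (f1 f2 f3 f4 f5 : Nat → String) :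
    ∀ (l : List Nat) (a b c d e : List String),
      l.foldl (fun (acc : List String × List String × List String × List String × List String) i =>
          (acc.1 ++ [f1 i], acc.2.1 ++ [f2 i], acc.2.2.1 ++ [f3 i],
           acc.2.2.2.1 ++ [f4 i], acc.2.2.2.2 ++ [f5 i])) (a, b, c, d, e)
        = (a ++ l.map f1, b ++ l.map f2, c ++ l.map f3, d ++ l.map f4, e ++ l.map f5) := by
  intro l
  induction l with
  | nil => intro a b c d e; simp
  | cons x t ih =>
      intro a b c d e
      simp only [List.foldl_cons, ih, List.map_cons, List.append_assoc, List.cons_append,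
        List.nil_append]

-- Separator-between-terms: a trailing separator on all but the last term IS the join.
theorem pv_join_tail (sep : List Char) :
    ∀ (m : Nat) (t : Nat → List Char),
      PySem.Chars.join sep ((List.range (m + 1)).map t)
        = PySem.Chars.join [] ((List.range m).map (fun i => t i ++ sep)) ++ t m := by
  intro m
  induction m with
  | zero => intro t; simp [PySem.Chars.join_singleton, PySem.Chars.join_nil]
  | succ m ih =>
      intro t
      have L : (List.range (m + 1 + 1)).map t
          = t 0 :: (List.range (m + 1)).map (fun i => t (i + 1)) := by
        rw [List.range_succ_eq_map]
        simp [List.map_map, Function.comp, Nat.succ_eq_add_one]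
      have R : (List.range (m + 1)).map (fun i => t i ++ sep)
          = (t 0 ++ sep) :: (List.range m).map (fun i => t (i + 1) ++ sep) := by
        rw [List.range_succ_eq_map]
        simp [List.map_map, Function.comp, Nat.succ_eq_add_one]
      have hne : (List.range (m + 1)).map (fun i => t (i + 1)) ≠ [] := by
        simp [List.range_succ_eq_map]
      rw [L, R, pv_join_cons_of_ne_nil sep _ hne, ih (fun i => t (i + 1)),
        pv_join_nil_cons]
      simp

-- A's conditional " + " loop produces exactly the " + "-join of the bare terms.
theorem pv_obj_join (sep : List Char) (t : Nat → List Char) :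
    ∀ (n : Nat),
      PySem.Chars.join [] ((List.range n).map (fun i => t i ++ if i + 1 < n then sep else []))
        = PySem.Chars.join sep ((List.range n).map t) := by
  intro n
  cases n with
  | zero => simp [PySem.Chars.join_nil]
  | succ m =>
      have hmap : (List.range m).map (fun i => t i ++ if i + 1 < m + 1 then sep else [])
          = (List.range m).map (fun i => t i ++ sep) := by
        apply List.map_congr_left
        intro i hi
        have : i < m := List.mem_range.mp hi
        simp [Nat.succ_lt_succ this]
      rw [List.range_succ, List.map_append, List.map_append, hmap, List.map_singleton,
        if_neg (Nat.lt_irrefl (m + 1)), List.append_nil, pv_join_append_singleton,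
        ← List.map_append, ← List.range_succ, pv_join_tail]

-- Normalising A's objective-loop body to the "state ++ piece" shape.
theorem pv_obj_body (n : Nat) :
    (fun (s : String) (i : Nat) =>
        if i + 1 < n then s ++ "X_" ++ PySem.Int.toStr i ++ " + "
        else s ++ "X_" ++ PySem.Int.toStr i)
      = fun (s : String) (i : Nat) =>
        s ++ ("X_" ++ PySem.Int.toStr i ++ if i + 1 < n then " + " else "") := by
  funext s i
  by_cases h : i + 1 < n <;> simp [h, String.append_assoc, String.append_empty]

theorem ampl_code_rhs_constraint_spec_aux (identif : List Int) :
    ampl_code_rhs_constraint identif = ampl_code_rhs_constraint_alt identif := by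
  apply String.toList_inj.mp
  dsimp only [ampl_code_rhs_constraint, ampl_code_rhs_constraint_alt]
  rw [pv_build5, pv_obj_body identif.length]
  simp only [List.nil_append, String.append_assoc]
  have hobj := pv_obj_join (" + ".toList)
    (fun i => "X_".toList ++ (PySem.Int.toStr (i : Int)).toList) identif.length
  simp only [List.append_assoc] at hobj
  simp only [pv_foldl_append_toList, String.toList_append, PySem.Str.toList_join,
    List.map_map, Function.comp_def, pvSetDecl, pvParamDecl, pvDummyDecl, pvObjTerm,
    pvConstraintPair, List.append_assoc, apply_ite String.toList, String.toList_empty]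
  rw [hobj]
  simp

-- ===== VERDICT (by name: the statement is the Claim_ definition above) =====
theorem ampl_code_rhs_constraint_spec : Claim_equal_ampl_code_rhs_constraint := by
  intro identif _
  exact ampl_code_rhs_constraint_spec_aux identif
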